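-- pv_equiv track=rewrite | github.com/ishankkm/pythonProgs | progs/twinStrings.py | twins
-- ===== SOURCE A (Python) =====
-- def twins(a, b):
--
--     results = []
--     for i in range(len(a)):
--
--         a_list, b_list = list(a[i]), list(b[i])
--
--         if len(a_list) == len(b_list):
--             a_set_odd, a_set_even = set(a_list[1::2]), set(a_list[0::2])
--             b_set_odd, b_set_even = set(b_list[1::2]), set(b_list[0::2])
--
--             if a_set_odd == b_set_odd and a_set_even == b_set_even:
--                 results.append('Yes')
--             else:
--                 results.append('No')
--     return results
-- ===== SOURCE B (Python) =====
-- def _covered(s, t):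
--     # every character of s can be matched at some same-parity position of t
--     return all(any(j % 2 == k % 2 and c == d for k, d in enumerate(t))
--                for j, c in enumerate(s))
--
--
-- def twins(a, b):
--     results = []
--     for x, y in zip(a, b):
--         if len(x) == len(y):
--             results.append('Yes' if _covered(x, y) and _covered(y, x) else 'No')
--     return results
-- ===== Notes on version B (the rewrite author's own statement) =====
-- stated objective: alternative
-- what changed: B builds no sets at all: for each zipped equal-length pair it answers by mutual brute-force membership scans (every character must have a same-parity match in the other string, both directions), replacing A's four stepped-slice set constructions and set comparisons with nested enumerate scans; correct because set equality is mutual inclusion.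
import Mathlib
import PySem

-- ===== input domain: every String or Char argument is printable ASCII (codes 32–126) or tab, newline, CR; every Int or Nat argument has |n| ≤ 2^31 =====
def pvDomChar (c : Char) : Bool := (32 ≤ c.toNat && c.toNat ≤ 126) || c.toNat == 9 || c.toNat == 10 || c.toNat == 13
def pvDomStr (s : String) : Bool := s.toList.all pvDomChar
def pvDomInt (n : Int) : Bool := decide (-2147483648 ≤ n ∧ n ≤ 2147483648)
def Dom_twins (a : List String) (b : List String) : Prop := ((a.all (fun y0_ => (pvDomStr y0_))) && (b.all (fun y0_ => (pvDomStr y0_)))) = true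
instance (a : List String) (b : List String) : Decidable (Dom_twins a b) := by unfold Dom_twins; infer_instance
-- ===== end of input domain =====

-- B is an alternative algorithm: it builds no sets at all, deciding each pair by mutual
-- brute-force same-parity membership scans over zipped strings (set equality = mutual
-- inclusion); return values proved equal on Pre_.

-- ===== PORT A =====
def twins (a : List String) (b : List String) : List String :=
  (PySem.List.pyRange 0 a.length 1).foldl (fun results i =>
    let a_list := ((PySem.List.pyGet? a i).getD "").toList
    let b_list := ((PySem.List.pyGet? b i).getD "").toList
    if a_list.length = b_list.length then
      let a_set_odd  := PySem.Set.ofList ((PySem.List.slice? a_list (some 1) none 2).getD [])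
      let a_set_even := PySem.Set.ofList ((PySem.List.slice? a_list (some 0) none 2).getD [])
      let b_set_odd  := PySem.Set.ofList ((PySem.List.slice? b_list (some 1) none 2).getD [])
      let b_set_even := PySem.Set.ofList ((PySem.List.slice? b_list (some 0) none 2).getD [])
      if PySem.Set.equal a_set_odd b_set_odd && PySem.Set.equal a_set_even b_set_even then
        results ++ ["Yes"]
      else
        results ++ ["No"]
    else results) []

-- ===== PORT B =====
-- port of Source B's _covered: all(any(j % 2 == k % 2 and c == d for k, d in enumerate(t)) for j, c in enumerate(s))
def twinsCovered (s t : List Char) : Bool :=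
  (PySem.List.enumerate s 0).all (fun jc =>
    (PySem.List.enumerate t 0).any (fun kd =>
      decide (jc.1 % 2 = kd.1 % 2) && decide (jc.2 = kd.2)))

def twins_alt (a : List String) (b : List String) : List String :=
  (a.zip b).foldl (fun results p =>
    if p.1.toList.length = p.2.toList.length then
      results ++ [if twinsCovered p.1.toList p.2.toList && twinsCovered p.2.toList p.1.toList then "Yes" else "No"]
    else results) []

-- ===== PRECONDITION & SPEC =====
-- A indexes b[i] for every i < len(a), so it raises IndexError iff len(b) < len(a).
def Pre_twins (a : List String) (b : List String) : Prop := a.length ≤ b.length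
instance (a : List String) (b : List String) : Decidable (Pre_twins a b) := by unfold Pre_twins; infer_instance
def pvWitness_twins : List String × List String := (["ab", "xy"], ["ba", "yy"])

def Spec_twins (a : List String) (b : List String) (out : List String) : Prop := out = twins_alt a b
instance (a : List String) (b : List String) (out : List String) : Decidable (Spec_twins a b out) := by unfold Spec_twins; infer_instance

-- ===== CLAIM (what is proved, stated in full; the proofs are below) =====
def Claim_equal_twins : Prop := ∀ (a : List String) (b : List String), Dom_twins a b → Pre_twins a b → Spec_twins a b (twins a b)

-- ===== LEMMAS AND PROOFS =====

-- membership in a stepped slice x[r::2] (r = 0 or 1)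
theorem mem_slice2 (x : List Char) (r : Int) (hr : r = 0 ∨ r = 1) (c : Char) :
    c ∈ (PySem.List.slice? x (some r) none 2).getD [] ↔
      ∃ k : Nat, k < x.length ∧ (k : Int) % 2 = r ∧ x[k]? = some c := by
  have hr0 : ¬ (r < 0) := by omega
  unfold PySem.List.slice? PySem.List.sliceIndices
  simp only [if_neg (by norm_num : (2:Int) ≠ 0), show ¬ ((2:Int) < 0) by norm_num, if_false,
    if_neg hr0, Option.getD_some, List.mem_filterMap, List.mem_range]
  constructor
  · rintro ⟨k, hk, hget⟩
    have hlt : (min r (x.length:Int) + 2 * (k:Int)).toNat < x.length := by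
      by_contra hge
      rw [List.getElem?_eq_none (by omega)] at hget
      simp at hget
    refine ⟨(min r (x.length:Int) + 2 * (k:Int)).toNat, hlt, ?_, ?_⟩
    · split_ifs at hk with h1 h2 <;> omega
    · simpa [List.getElem?_eq_getElem hlt] using hget
  · rintro ⟨j, hj, hmod, hget⟩
    have hrj : r ≤ (j:Int) := by omega
    refine ⟨((j:Int) - r).toNat / 2, ?_, ?_⟩
    · split_ifs with h1 h2 <;> omega
    · have : (min r (x.length:Int) + 2 * ((((j:Int) - r).toNat / 2 : Nat):Int)).toNat = j := by omega
      rw [this]; exact hget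

-- the brute-force scan succeeds iff every position of s has a same-parity match in t
theorem covered_iff (s t : List Char) :
    twinsCovered s t = true ↔
      ∀ j : Nat, ∀ hj : j < s.length, ∃ k : Nat, k < t.length ∧ (j:Int) % 2 = (k:Int) % 2 ∧ t[k]? = some s[j] := by
  unfold twinsCovered
  simp only [List.all_eq_true, List.any_eq_true, PySem.List.mem_enumerate_iff,
    Bool.and_eq_true, decide_eq_true_eq]
  constructor
  · intro h j hj
    obtain ⟨q, ⟨k, hk, hq⟩, h1, h2⟩ := h ((0 + (j:Int), s[j])) ⟨j, hj, rfl⟩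
    subst hq
    simp only [] at h1 h2
    exact ⟨k, hk, by simpa using h1, by simp [List.getElem?_eq_getElem hk, h2]⟩
  · rintro h p ⟨j, hj, hp⟩
    subst hp
    obtain ⟨k, hk, h1, h2⟩ := h j hj
    refine ⟨(0 + (k:Int), t[k]), ⟨k, hk, rfl⟩, by simpa using h1, ?_⟩
    simp [List.getElem?_eq_getElem hk] at h2
    simpa using h2.symm

-- A's per-pair boolean (both parity slice sets equal) equals B's (mutual covering)
theorem sets_eq_covered (x y : List Char) :
    (PySem.Set.equal (PySem.Set.ofList ((PySem.List.slice? x (some 1) none 2).getD []))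
        (PySem.Set.ofList ((PySem.List.slice? y (some 1) none 2).getD [])) &&
     PySem.Set.equal (PySem.Set.ofList ((PySem.List.slice? x (some 0) none 2).getD []))
        (PySem.Set.ofList ((PySem.List.slice? y (some 0) none 2).getD []))) =
    (twinsCovered x y && twinsCovered y x) := by
  rw [Bool.eq_iff_iff]
  simp only [Bool.and_eq_true, PySem.Set.equal_iff, PySem.Set.mem_ofList, covered_iff]
  constructor
  · rintro ⟨ho, he⟩
    constructor
    · intro j hj
      rcases (by omega : ((j:Nat):Int) % 2 = 0 ∨ ((j:Nat):Int) % 2 = 1) with h0 | h1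
      · have := (he x[j]).mp ((mem_slice2 x 0 (Or.inl rfl) _).mpr
          ⟨j, hj, h0, List.getElem?_eq_getElem hj⟩)
        obtain ⟨k, hk, hk0, hc⟩ := (mem_slice2 y 0 (Or.inl rfl) _).mp this
        exact ⟨k, hk, by omega, hc⟩
      · have := (ho x[j]).mp ((mem_slice2 x 1 (Or.inr rfl) _).mpr
          ⟨j, hj, h1, List.getElem?_eq_getElem hj⟩)
        obtain ⟨k, hk, hk1, hc⟩ := (mem_slice2 y 1 (Or.inr rfl) _).mp this
        exact ⟨k, hk, by omega, hc⟩
    · intro j hj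
      rcases (by omega : ((j:Nat):Int) % 2 = 0 ∨ ((j:Nat):Int) % 2 = 1) with h0 | h1
      · have := (he y[j]).mpr ((mem_slice2 y 0 (Or.inl rfl) _).mpr
          ⟨j, hj, h0, List.getElem?_eq_getElem hj⟩)
        obtain ⟨k, hk, hk0, hc⟩ := (mem_slice2 x 0 (Or.inl rfl) _).mp this
        exact ⟨k, hk, by omega, hc⟩
      · have := (ho y[j]).mpr ((mem_slice2 y 1 (Or.inr rfl) _).mpr
          ⟨j, hj, h1, List.getElem?_eq_getElem hj⟩)
        obtain ⟨k, hk, hk1, hc⟩ := (mem_slice2 x 1 (Or.inr rfl) _).mp this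
        exact ⟨k, hk, by omega, hc⟩
  · rintro ⟨hxy, hyx⟩
    constructor
    · intro c
      rw [mem_slice2 x 1 (Or.inr rfl), mem_slice2 y 1 (Or.inr rfl)]
      constructor
      · rintro ⟨j, hj, h1, hc⟩
        obtain ⟨k, hk, hpar, hck⟩ := hxy j hj
        simp [List.getElem?_eq_getElem hj] at hc
        exact ⟨k, hk, by omega, by rw [hck, hc]⟩
      · rintro ⟨j, hj, h1, hc⟩
        obtain ⟨k, hk, hpar, hck⟩ := hyx j hj
        simp [List.getElem?_eq_getElem hj] at hc
        exact ⟨k, hk, by omega, by rw [hck, hc]⟩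
    · intro c
      rw [mem_slice2 x 0 (Or.inl rfl), mem_slice2 y 0 (Or.inl rfl)]
      constructor
      · rintro ⟨j, hj, h0, hc⟩
        obtain ⟨k, hk, hpar, hck⟩ := hxy j hj
        simp [List.getElem?_eq_getElem hj] at hc
        exact ⟨k, hk, by omega, by rw [hck, hc]⟩
      · rintro ⟨j, hj, h0, hc⟩
        obtain ⟨k, hk, hpar, hck⟩ := hyx j hj
        simp [List.getElem?_eq_getElem hj] at hc
        exact ⟨k, hk, by omega, by rw [hck, hc]⟩

-- the index loop over a common prefix equals the zip loop
theorem twins_aux (a b : List String) (h : a.length ≤ b.length) :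
  ∀ (m k : Nat) (acc : List String), a.length - k = m → k ≤ a.length →
    (PySem.List.pyRange (k : Int) (a.length : Int) 1).foldl (fun results i =>
      let a_list := ((PySem.List.pyGet? a i).getD "").toList
      let b_list := ((PySem.List.pyGet? b i).getD "").toList
      if a_list.length = b_list.length then
        if PySem.Set.equal (PySem.Set.ofList ((PySem.List.slice? a_list (some 1) none 2).getD []))
             (PySem.Set.ofList ((PySem.List.slice? b_list (some 1) none 2).getD [])) &&
           PySem.Set.equal (PySem.Set.ofList ((PySem.List.slice? a_list (some 0) none 2).getD []))
             (PySem.Set.ofList ((PySem.List.slice? b_list (some 0) none 2).getD [])) then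
          results ++ ["Yes"]
        else results ++ ["No"]
      else results) acc
    = ((a.drop k).zip (b.drop k)).foldl (fun results p =>
        if p.1.toList.length = p.2.toList.length then
          results ++ [if twinsCovered p.1.toList p.2.toList && twinsCovered p.2.toList p.1.toList then "Yes" else "No"]
        else results) acc := by
  intro m
  induction m with
  | zero =>
    intro k acc hm hk
    have hke : k = a.length := by omega
    subst hke
    rw [PySem.List.pyRange_one_eq_nil le_rfl, List.drop_eq_nil_of_le le_rfl]
    simp
  | succ m ih =>
    intro k acc hm hk
    have hlt : k < a.length := by omega
    have hltb : k < b.length := by omega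
    rw [PySem.List.pyRange_one_cons (by exact_mod_cast hlt)]
    rw [List.drop_eq_getElem_cons hlt, List.drop_eq_getElem_cons hltb]
    simp only [List.foldl_cons, List.zip_cons_cons]
    have hstep : ((k : Int) + 1) = ((k + 1 : Nat) : Int) := by push_cast; ring
    rw [hstep]
    have hget : (PySem.List.pyGet? a (k : Int)).getD "" = a[k] := by
      simp [PySem.List.pyGet?_natCast, List.getElem?_eq_getElem hlt]
    have hgetb : (PySem.List.pyGet? b (k : Int)).getD "" = b[k] := by
      simp [PySem.List.pyGet?_natCast, List.getElem?_eq_getElem hltb]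
    rw [hget, hgetb]
    rw [sets_eq_covered]
    rw [show ∀ (r : List String) (c : Bool), (if c then r ++ ["Yes"] else r ++ ["No"]) = r ++ [if c then "Yes" else "No"] from fun r c => by split <;> rfl]
    split <;> exact ih (k+1) _ (by omega) (by omega)

-- ===== VERDICT (by name: the statement is the Claim_ definition above) =====
theorem twins_spec : Claim_equal_twins := by
  intro a b _hd hpre
  unfold Spec_twins twins twins_alt
  have := twins_aux a b hpre a.length 0 [] (by omega) (Nat.zero_le _)
  simpa using this
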